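-- pv_equiv track=rewrite | github.com/emarteca/npm-filter | src/TestInfo.py | called_in_command
-- ===== SOURCE A (Python) =====
-- def called_in_command( str_comm, command, manager):
-- 	# command ends with command terminator (this list includes \0 end-of-string,
-- 	# but this is not available to check in Python so we use endswith)
-- 	post_command_chars = [ "" ] if command.endswith(str_comm) else [ " ", "\t", ";"]
-- 	for pcc in post_command_chars:
-- 		check_comm = str_comm + pcc
-- 		if command.find( check_comm) == 0:
-- 			return( True)
-- 		if command.find( "&&" + check_comm) > -1 or command.find( "&& " + check_comm) > -1:
-- 			return( True)
-- 		if command.find( "cross-env NODE_ENV=test " + check_comm) > -1 or command.find( "cross-env NODE_ENV=production " + check_comm) > -1: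
-- 			return( True)
-- 		if command.find( "cross-env CI=true " + check_comm) > -1:
-- 			return( True)
-- 		if command.find( "cross-env TZ=utc " + check_comm) > -1:
-- 			return( True)
-- 		if command.find( "opener " + check_comm) > -1:
-- 			return( True)
-- 		if command.find( "gulp " + check_comm) > -1:
-- 			return( True)
-- 		if command.find( "nyc " + check_comm) > -1:
-- 			return( True)
-- 	return( False)
-- ===== SOURCE B (Python) =====
-- def called_in_command(str_comm, command, manager):
--     # Scan every occurrence position of the bare needle in command once and
--     # inspect the text before it, instead of probing ten composed patterns.
--     prefixes = ("&&", "&& ", "cross-env NODE_ENV=test ", "cross-env NODE_ENV=production ",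
--                 "cross-env CI=true ", "cross-env TZ=utc ", "opener ", "gulp ", "nyc ")
--     suffixes = [""] if command.endswith(str_comm) else [" ", "\t", ";"]
--     for sfx in suffixes:
--         needle = str_comm + sfx
--         for i in range(len(command) - len(needle) + 1):
--             if command[i:i + len(needle)] == needle and (i == 0 or command[:i].endswith(prefixes)):
--                 return True
--     return False
-- ===== Notes on version B (the rewrite author's own statement) =====
-- stated objective: alternative
-- what changed: Instead of probing ten composed launcher-prefix+needle patterns with repeated command.find calls per terminator, B scans each candidate occurrence position of the bare needle once and checks the context before it (position 0, or the preceding text ends with a launcher prefix).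
import Mathlib
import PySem

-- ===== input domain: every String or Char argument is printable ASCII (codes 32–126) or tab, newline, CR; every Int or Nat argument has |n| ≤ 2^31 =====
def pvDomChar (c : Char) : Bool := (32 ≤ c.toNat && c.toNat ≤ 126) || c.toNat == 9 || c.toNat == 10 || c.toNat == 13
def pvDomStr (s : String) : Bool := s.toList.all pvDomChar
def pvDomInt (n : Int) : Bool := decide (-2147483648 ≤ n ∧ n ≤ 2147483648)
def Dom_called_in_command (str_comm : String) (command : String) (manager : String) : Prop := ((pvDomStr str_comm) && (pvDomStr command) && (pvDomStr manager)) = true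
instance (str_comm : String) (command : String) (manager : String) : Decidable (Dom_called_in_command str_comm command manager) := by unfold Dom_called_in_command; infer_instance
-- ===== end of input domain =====

-- B replaces A's ten composed-pattern find probes per terminator with a single scan over
-- candidate occurrence positions of the bare needle, checking the context before each hit (alternative algorithm, same cost class).

-- ===== PORT A =====
-- the for-loop over post_command_chars, with its if-chain of find probes, step for step
def pvALoop (str_comm : String) (command : String) : List String → Bool
  | [] => false
  | pcc :: rest =>
    let check_comm := str_comm ++ pcc
    if PySem.Str.find command check_comm = 0 then true
    else if PySem.Str.find command ("&&" ++ check_comm) > -1 ∨ PySem.Str.find command ("&& " ++ check_comm) > -1 then true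
    else if PySem.Str.find command ("cross-env NODE_ENV=test " ++ check_comm) > -1 ∨ PySem.Str.find command ("cross-env NODE_ENV=production " ++ check_comm) > -1 then true
    else if PySem.Str.find command ("cross-env CI=true " ++ check_comm) > -1 then true
    else if PySem.Str.find command ("cross-env TZ=utc " ++ check_comm) > -1 then true
    else if PySem.Str.find command ("opener " ++ check_comm) > -1 then true
    else if PySem.Str.find command ("gulp " ++ check_comm) > -1 then true
    else if PySem.Str.find command ("nyc " ++ check_comm) > -1 then true
    else pvALoop str_comm command rest

def called_in_command (str_comm : String) (command : String) (manager : String) : Bool :=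
  let post_command_chars := if PySem.Str.endswith command str_comm then [""] else [" ", "\t", ";"]
  pvALoop str_comm command post_command_chars

-- ===== PORT B =====
def pvPrefixes : List String :=
  ["&&", "&& ", "cross-env NODE_ENV=test ", "cross-env NODE_ENV=production ",
   "cross-env CI=true ", "cross-env TZ=utc ", "opener ", "gulp ", "nyc "]

-- the inner 'for i in range(len(command) - len(needle) + 1)' position scan of Source B
def pvBScan (cs : List Char) (needle : List Char) : Bool :=
  (PySem.List.pyRange 0 ((cs.length : Int) - needle.length + 1) 1).any (fun i =>
    (PySem.List.slice cs (some i) (some (i + needle.length)) == needle) &&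
    (i == 0 || pvPrefixes.any (fun p => PySem.Chars.endswith (PySem.List.slice cs none (some i)) p.toList)))

def called_in_command_alt (str_comm : String) (command : String) (manager : String) : Bool :=
  let suffixes := if PySem.Str.endswith command str_comm then [""] else [" ", "\t", ";"]
  suffixes.any (fun sfx => pvBScan command.toList (str_comm.toList ++ sfx.toList))

-- ===== PRECONDITION & SPEC =====
def Spec_called_in_command (str_comm : String) (command : String) (manager : String) (out : Bool) : Prop := out = called_in_command_alt str_comm command manager
instance (str_comm : String) (command : String) (manager : String) (out : Bool) : Decidable (Spec_called_in_command str_comm command manager out) := by unfold Spec_called_in_command; infer_instance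

-- ===== CLAIM =====
def Claim_equal_called_in_command : Prop := ∀ (str_comm : String) (command : String) (manager : String), Dom_called_in_command str_comm command manager → Spec_called_in_command str_comm command manager (called_in_command str_comm command manager)

-- ===== LEMMAS AND PROOFS =====

-- command.find(sub) == 0 is exactly 'sub is a prefix of command'
theorem pv_find_eq_zero_iff (s sub : String) :
    PySem.Str.find s sub = 0 ↔ sub.toList <+: s.toList := by
  rw [PySem.Str.find_eq]
  constructor
  · intro h
    have h0 : 0 ≤ PySem.Chars.find s.toList sub.toList := by omega
    have := (PySem.Chars.find_spec (s := s.toList) (sub := sub.toList) h0).1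
    simpa [h] using this
  · intro h
    have h0 : 0 ≤ PySem.Chars.find s.toList sub.toList := by
      rw [PySem.Chars.find_nonneg_iff]
      exact h.isInfix
    by_contra hne
    have hpos : 0 < (PySem.Chars.find s.toList sub.toList).toNat := by omega
    have := (PySem.Chars.find_spec (s := s.toList) (sub := sub.toList) h0).2 0 hpos
    simp at this
    exact this h

-- command.find(sub) > -1 is exactly 'sub in command'
theorem pv_find_gt_iff (s sub : String) :
    PySem.Str.find s sub > -1 ↔ sub.toList <:+: s.toList := by
  rw [← PySem.Str.find_nonneg_iff]
  omega

-- the position scan finds the needle in context iff some composed pattern occurs: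
-- a hit at 0 is a prefix, a hit after a launcher prefix p is an occurrence of p ++ needle
theorem pvBScan_iff (cs needle : List Char) :
    pvBScan cs needle = true ↔
      needle <+: cs ∨ ∃ p ∈ pvPrefixes, (p.toList ++ needle) <:+: cs := by
  unfold pvBScan
  rw [List.any_eq_true]
  constructor
  · rintro ⟨i, hi, hcond⟩
    rw [PySem.List.mem_pyRange_one] at hi
    obtain ⟨hi0, hilt⟩ := hi
    simp only [Bool.and_eq_true, beq_iff_eq, Bool.or_eq_true, List.any_eq_true] at hcond
    obtain ⟨hslice, hctx⟩ := hcond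
    rw [PySem.List.slice_toNat cs hi0 (by positivity)] at hslice
    have hj : ((i + (needle.length : Int)).toNat - i.toNat) = needle.length := by omega
    rw [hj] at hslice
    have hpref : needle <+: cs.drop i.toNat := hslice ▸ List.take_prefix _ _
    rcases hctx with hzero | ⟨p, hp, hend⟩
    · left; simpa [show i = 0 from hzero] using hpref
    · right
      refine ⟨p, hp, ?_⟩
      rw [PySem.List.slice_to cs hi0, PySem.Chars.endswith_iff] at hend
      obtain ⟨u, hu⟩ := hend
      obtain ⟨w, hw⟩ := hpref
      exact ⟨u, w, by rw [← List.take_append_drop i.toNat cs, ← hu, ← hw]; simp⟩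
  · intro h
    rcases h with hpref | ⟨p, hp, u, w, huw⟩
    · refine ⟨0, ?_, ?_⟩
      · rw [PySem.List.mem_pyRange_one]
        have := hpref.length_le
        omega
      · simp only [Bool.and_eq_true, beq_iff_eq, Bool.or_eq_true]
        constructor
        · rw [PySem.List.slice_toNat cs le_rfl (by positivity)]
          simpa using (List.prefix_iff_eq_take.mp hpref).symm
        · left; trivial
    · -- cs = u ++ (p ++ needle) ++ w ; the hit is at j = |u| + |p|
      refine ⟨((u.length + p.toList.length : Nat) : Int), ?_, ?_⟩
      · rw [PySem.List.mem_pyRange_one]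
        have : cs.length = u.length + (p.toList.length + needle.length) + w.length := by
          rw [← huw]; simp; omega
        omega
      · have htn : (((u.length + p.toList.length : Nat) : Int)).toNat = u.length + p.toList.length := by omega
        have hdrop : cs.drop (u.length + p.toList.length) = needle ++ w := by
          rw [← huw]
          rw [show u ++ (p.toList ++ needle) ++ w = (u ++ p.toList) ++ (needle ++ w) by simp]
          rw [show u.length + p.toList.length = (u ++ p.toList).length by simp]
          exact List.drop_left ..
        have htake : cs.take (u.length + p.toList.length) = u ++ p.toList := by
          rw [← huw]
          rw [show u ++ (p.toList ++ needle) ++ w = (u ++ p.toList) ++ (needle ++ w) by simp]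
          rw [show u.length + p.toList.length = (u ++ p.toList).length by simp]
          exact List.take_left ..
        simp only [Bool.and_eq_true, beq_iff_eq, Bool.or_eq_true, List.any_eq_true]
        constructor
        · rw [PySem.List.slice_toNat cs (by positivity) (by positivity), htn]
          have : ((((u.length + p.toList.length : Nat) : Int) + (needle.length : Int)).toNat - (u.length + p.toList.length)) = needle.length := by omega
          rw [this, hdrop]
          exact List.take_left ..
        · right
          refine ⟨p, hp, ?_⟩
          rw [PySem.List.slice_to cs (by positivity), htn, htake, PySem.Chars.endswith_iff]
          exact ⟨u, rfl⟩

-- A's if-chain loop over the terminators equals B's any-of-position-scans over the same list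
theorem pvALoop_eq_scan (str_comm command : String) (l : List String) :
    pvALoop str_comm command l =
      l.any (fun sfx => pvBScan command.toList (str_comm.toList ++ sfx.toList)) := by
  induction l with
  | nil => rfl
  | cons pcc rest ih =>
    rw [List.any_cons, ← ih]
    show (if _ then _ else _) = _
    have hscan := pvBScan_iff command.toList (str_comm.toList ++ pcc.toList)
    simp only [pvPrefixes, List.mem_cons, List.not_mem_nil, exists_eq_or_imp, or_false] at hscan
    by_cases hb : pvBScan command.toList (str_comm.toList ++ pcc.toList) = true
    · have h := hscan.mp hb
      rw [hb]
      simp only [Bool.true_or]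
      split_ifs with h1 h2 h3 h4 h5 h6 h7 h8 <;> try rfl
      exfalso
      rcases h with hpref | h
      · exact h1 (by rw [pv_find_eq_zero_iff]; simpa using hpref)
      · rcases h with h | h | h | h | h | h | h | h | h
        · exact h2 (Or.inl (by rw [pv_find_gt_iff]; simpa using h))
        · exact h2 (Or.inr (by rw [pv_find_gt_iff]; simpa using h))
        · exact h3 (Or.inl (by rw [pv_find_gt_iff]; simpa using h))
        · exact h3 (Or.inr (by rw [pv_find_gt_iff]; simpa using h))
        · exact h4 (by rw [pv_find_gt_iff]; simpa using h)
        · exact h5 (by rw [pv_find_gt_iff]; simpa using h)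
        · exact h6 (by rw [pv_find_gt_iff]; simpa using h)
        · exact h7 (by rw [pv_find_gt_iff]; simpa using h)
        · exact h8 (by rw [pv_find_gt_iff]; simpa using h)
    · have hb' : pvBScan command.toList (str_comm.toList ++ pcc.toList) = false := by
        simpa using hb
      rw [hb']
      simp only [Bool.false_or]
      have hno := fun h => hb (hscan.mpr h)
      split_ifs with h1 h2 h3 h4 h5 h6 h7 h8 <;> try rfl
      all_goals exfalso; apply hno
      · exact Or.inl (by have := (pv_find_eq_zero_iff command (str_comm ++ pcc)).mp h1; simpa using this)
      all_goals right
      · rcases h2 with h | h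
        · exact Or.inl (by have := (pv_find_gt_iff command ("&&" ++ (str_comm ++ pcc))).mp h; simpa using this)
        · exact Or.inr (Or.inl (by have := (pv_find_gt_iff command ("&& " ++ (str_comm ++ pcc))).mp h; simpa using this))
      · rcases h3 with h | h
        · exact Or.inr (Or.inr (Or.inl (by have := (pv_find_gt_iff command ("cross-env NODE_ENV=test " ++ (str_comm ++ pcc))).mp h; simpa using this)))
        · exact Or.inr (Or.inr (Or.inr (Or.inl (by have := (pv_find_gt_iff command ("cross-env NODE_ENV=production " ++ (str_comm ++ pcc))).mp h; simpa using this))))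
      · exact Or.inr (Or.inr (Or.inr (Or.inr (Or.inl (by have := (pv_find_gt_iff command ("cross-env CI=true " ++ (str_comm ++ pcc))).mp h4; simpa using this)))))
      · exact Or.inr (Or.inr (Or.inr (Or.inr (Or.inr (Or.inl (by have := (pv_find_gt_iff command ("cross-env TZ=utc " ++ (str_comm ++ pcc))).mp h5; simpa using this))))))
      · exact Or.inr (Or.inr (Or.inr (Or.inr (Or.inr (Or.inr (Or.inl (by have := (pv_find_gt_iff command ("opener " ++ (str_comm ++ pcc))).mp h6; simpa using this)))))))
      · exact Or.inr (Or.inr (Or.inr (Or.inr (Or.inr (Or.inr (Or.inr (Or.inl (by have := (pv_find_gt_iff command ("gulp " ++ (str_comm ++ pcc))).mp h7; simpa using this))))))))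
      · exact Or.inr (Or.inr (Or.inr (Or.inr (Or.inr (Or.inr (Or.inr (Or.inr (by have := (pv_find_gt_iff command ("nyc " ++ (str_comm ++ pcc))).mp h8; simpa using this))))))))

-- ===== VERDICT =====
theorem called_in_command_spec : Claim_equal_called_in_command := by
  intro str_comm command manager _
  unfold Spec_called_in_command called_in_command called_in_command_alt
  exact pvALoop_eq_scan str_comm command _
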